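-- pv_equiv track=rewrite | github.com/xifOO/psa | psa/metrics/tcc.py | _calculate_connected_pairs
-- ===== SOURCE A (Python) =====
-- def _calculate_connected_pairs(usage: dict[str, frozenset[str]]) -> int:
--     directly_connected_pairs = 0
--     methods = list(usage.keys())
--     for i in range(len(methods)):
--         for j in range(i + 1, len(methods)):
--             m1 = methods[i]
--             m2 = methods[j]
--
--             if usage[m1] & usage[m2]:
--                 directly_connected_pairs += 1
--
--     return directly_connected_pairs
-- ===== SOURCE B (Python) =====
-- def _calculate_connected_pairs(usage: dict[str, frozenset[str]]) -> int:
--     # Inverted index: attribute -> set of indices of earlier methods using it.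
--     # A pair is connected iff they share an attribute, so for each method we
--     # count the distinct earlier methods reachable through any of its attributes.
--     attr_index = {}
--     total = 0
--     for idx, attrs in enumerate(usage.values()):
--         neighbors = set()
--         for a in attrs:
--             neighbors |= attr_index.get(a, set())
--         total += len(neighbors)
--         for a in attrs:
--             attr_index.setdefault(a, set()).add(idx)
--     return total
-- ===== Notes on version B (the rewrite author's own statement) =====
-- stated objective: faster
-- what changed: Replaced the all-pairs set-intersection double loop by a single pass with an inverted index attribute->earlier-method set, counting for each method the distinct earlier methods reachable through its attributes.
import Mathlib
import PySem

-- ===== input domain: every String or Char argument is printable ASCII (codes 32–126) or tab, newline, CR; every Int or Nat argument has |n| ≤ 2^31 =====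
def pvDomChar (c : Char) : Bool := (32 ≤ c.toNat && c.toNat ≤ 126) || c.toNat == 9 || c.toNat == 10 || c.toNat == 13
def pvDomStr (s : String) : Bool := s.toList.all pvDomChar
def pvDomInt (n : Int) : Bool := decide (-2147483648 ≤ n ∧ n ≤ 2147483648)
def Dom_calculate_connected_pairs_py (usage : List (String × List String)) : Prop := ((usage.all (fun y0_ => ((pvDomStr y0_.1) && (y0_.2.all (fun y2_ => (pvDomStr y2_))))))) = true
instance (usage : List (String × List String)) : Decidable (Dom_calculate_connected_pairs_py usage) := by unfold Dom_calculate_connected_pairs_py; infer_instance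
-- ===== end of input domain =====

-- B replaces A's all-pairs frozenset-intersection double loop by a single pass with an
-- inverted index (attribute -> set of earlier method indices); same return value.

-- ===== PORT A =====
def calculate_connected_pairs_py (usage : List (String × List String)) : Int :=
  let d := PySem.Dict.ofList usage
  let methods := d.keys
  (PySem.List.pyRange 0 (methods.length : Int) 1).foldl
    (fun acc i =>
      (PySem.List.pyRange (i + 1) (methods.length : Int) 1).foldl
        (fun acc j =>
          let m1 := PySem.List.pyGetD methods i ""
          let m2 := PySem.List.pyGetD methods j ""
          if PySem.Set.inter (PySem.Set.ofList (d.getD m1 [])) (d.getD m2 []) ≠ [] then acc + 1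
          else acc)
        acc)
    0

-- ===== PORT B =====
def calculate_connected_pairs_py_alt (usage : List (String × List String)) : Int :=
  let d := PySem.Dict.ofList usage
  let res := (PySem.List.enumerate d.values 0).foldl
    (fun (st : PySem.Dict String (List Int) × Int) p =>
      let neighbors := p.2.foldl (fun nb a => PySem.Set.union nb (st.1.getD a [])) PySem.Set.empty
      let idx2 := p.2.foldl (fun di a => di.insert a (PySem.Set.add (di.getD a []) p.1)) st.1
      (idx2, st.2 + (neighbors.length : Int)))
    (PySem.Dict.empty, 0)
  res.2

-- ===== PRECONDITION & SPEC =====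
def Spec_calculate_connected_pairs_py (usage : List (String × List String)) (out : Int) : Prop := out = calculate_connected_pairs_py_alt usage
instance (usage : List (String × List String)) (out : Int) : Decidable (Spec_calculate_connected_pairs_py usage out) := by unfold Spec_calculate_connected_pairs_py; infer_instance

-- ===== CLAIM (what is proved, stated in full; the proofs are below) =====
def Claim_equal_calculate_connected_pairs_py : Prop := ∀ (usage : List (String × List String)), Dom_calculate_connected_pairs_py usage → Spec_calculate_connected_pairs_py usage (calculate_connected_pairs_py usage)

-- ===== LEMMAS AND PROOFS =====

def pvConn (u v : List String) : Bool := u.any (fun x => v.contains x)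
def pvInner (vals : List (List String)) (j : Nat) : Nat :=
  ((List.range j).filter (fun i => pvConn (vals.getD i []) (vals.getD j []))).length
def pvCount (vals : List (List String)) : Nat :=
  ((List.range vals.length).map (fun j => pvInner vals j)).sum
def pvIdxList (vals : List (List String)) (j : Nat) (a : String) : List Int :=
  (((List.range j).filter (fun i => (vals.getD i []).contains a)).map (fun i => Int.ofNat i))

lemma pv_mem_idxList (vals : List (List String)) (j : Nat) (a : String) (x : Int) :
    x ∈ pvIdxList vals j a ↔ ∃ i : Nat, i < j ∧ a ∈ vals.getD i [] ∧ x = (i : Int) := by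
  unfold pvIdxList
  simp only [List.mem_map, List.mem_filter, List.mem_range, decide_eq_true_eq, List.contains_eq_mem]
  constructor
  · rintro ⟨i, ⟨hi, hc⟩, rfl⟩
    exact ⟨i, hi, hc, rfl⟩
  · rintro ⟨i, hi, hm, rfl⟩
    exact ⟨i, ⟨hi, hm⟩, rfl⟩

lemma pv_mem_foldl_union (attrs : List String) (D : PySem.Dict String (List Int)) (s : List Int) (x : Int) :
    x ∈ attrs.foldl (fun nb a => PySem.Set.union nb (D.getD a [])) s ↔
      x ∈ s ∨ ∃ a ∈ attrs, x ∈ D.getD a [] := by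
  induction attrs generalizing s with
  | nil => simp
  | cons a as ih =>
    simp only [List.foldl_cons, ih, PySem.Set.mem_union, List.mem_cons]
    constructor
    · rintro (((h|h)|⟨b,hb,hx⟩))
      · exact Or.inl h
      · exact Or.inr ⟨a, Or.inl rfl, h⟩
      · exact Or.inr ⟨b, Or.inr hb, hx⟩
    · rintro (h|⟨b,(rfl|hb),hx⟩)
      · exact Or.inl (Or.inl h)
      · exact Or.inl (Or.inr hx)
      · exact Or.inr ⟨b, hb, hx⟩

lemma pv_nodup_foldl_union (attrs : List String) (D : PySem.Dict String (List Int)) (s : List Int)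
    (hs : s.Nodup) :
    (attrs.foldl (fun nb a => PySem.Set.union nb (D.getD a [])) s).Nodup := by
  induction attrs generalizing s with
  | nil => exact hs
  | cons a as ih => exact ih _ (PySem.Set.nodup_union _ _ hs)

lemma pv_getD_foldl_insert_add (attrs : List String) (D : PySem.Dict String (List Int)) (j : Int) (a : String) :
    (attrs.foldl (fun di a' => di.insert a' (PySem.Set.add (di.getD a' []) j)) D).getD a []
      = if a ∈ attrs then PySem.Set.add (D.getD a []) j else D.getD a [] := by
  induction attrs generalizing D with
  | nil => simp
  | cons b bs ih =>
    simp only [List.foldl_cons, ih, PySem.Dict.getD_insert]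
    by_cases hab : a = b
    · subst hab
      have hjj : PySem.Set.add (PySem.Set.add (D.getD a []) j) j = PySem.Set.add (D.getD a []) j := by
        have : j ∈ PySem.Set.add (D.getD a []) j := by
          rw [PySem.Set.mem_add]; exact Or.inr rfl
        exact PySem.Set.add_of_mem this
      by_cases hm : a ∈ bs <;> simp only [hm, if_true, if_false, List.mem_cons, true_or, hjj]
    · by_cases hm : a ∈ bs <;> simp [hm, hab]

def pvIdxListConn (vals : List (List String)) (j : Nat) : List Int :=
  ((List.range j).filter (fun i => pvConn (vals.getD i []) (vals.getD j []))).map (fun i => Int.ofNat i)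

lemma pv_mem_idxListConn (vals : List (List String)) (j : Nat) (x : Int) :
    x ∈ pvIdxListConn vals j ↔
      ∃ i : Nat, i < j ∧ pvConn (vals.getD i []) (vals.getD j []) = true ∧ x = (i : Int) := by
  unfold pvIdxListConn
  simp only [List.mem_map, List.mem_filter, List.mem_range]
  constructor
  · rintro ⟨i, ⟨hi, hc⟩, rfl⟩
    exact ⟨i, hi, hc, rfl⟩
  · rintro ⟨i, hi, hm, rfl⟩
    exact ⟨i, ⟨hi, hm⟩, rfl⟩

lemma pv_nodup_idxListConn (vals : List (List String)) (j : Nat) :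
    (pvIdxListConn vals j).Nodup :=
  ((List.nodup_range).filter _).map (fun _ _ h => by exact Int.ofNat_inj.mp h)

-- the neighbors count at step j equals pvInner vals j
lemma pv_neighbors_len (vals : List (List String)) (j : Nat) (D : PySem.Dict String (List Int))
    (hD : ∀ a, D.getD a [] = pvIdxList vals j a) :
    ((vals.getD j []).foldl (fun nb a => PySem.Set.union nb (D.getD a [])) PySem.Set.empty).length
      = pvInner vals j := by
  have hnd1 : ((vals.getD j []).foldl (fun nb a => PySem.Set.union nb (D.getD a [])) PySem.Set.empty).Nodup :=
    pv_nodup_foldl_union _ _ _ List.nodup_nil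
  have hnd2 : (pvIdxListConn vals j).Nodup := pv_nodup_idxListConn vals j
  have hperm : ((vals.getD j []).foldl (fun nb a => PySem.Set.union nb (D.getD a [])) PySem.Set.empty).Perm
      (pvIdxListConn vals j) := by
    rw [List.perm_ext_iff_of_nodup hnd1 hnd2]
    intro x
    rw [pv_mem_foldl_union, pv_mem_idxListConn]
    simp only [PySem.Set.empty, List.not_mem_nil, false_or]
    constructor
    · rintro ⟨a, ha, hx⟩
      rw [hD a, pv_mem_idxList] at hx
      obtain ⟨i, hi, hm, rfl⟩ := hx
      refine ⟨i, hi, ?_, rfl⟩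
      rw [pvConn, List.any_eq_true]
      exact ⟨a, hm, by simpa using ha⟩
    · rintro ⟨i, hi, hc, rfl⟩
      rw [pvConn, List.any_eq_true] at hc
      obtain ⟨y, hy1, hy2⟩ := hc
      refine ⟨y, by simpa using hy2, ?_⟩
      rw [hD y, pv_mem_idxList]
      exact ⟨i, hi, hy1, rfl⟩
  rw [hperm.length_eq, pvIdxListConn, List.length_map, pvInner]

lemma pv_idxList_succ (vals : List (List String)) (j : Nat) (a : String) :
    pvIdxList vals (j+1) a
      = pvIdxList vals j a ++ (if (vals.getD j []).contains a then [Int.ofNat j] else []) := by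
  unfold pvIdxList
  rw [List.range_succ, List.filter_append, List.map_append]
  congr 1
  by_cases h : a ∈ vals.getD j [] <;>
    · simp only [List.getD_eq_getElem?_getD] at h
      simp [h]

lemma pv_inv_step (vals : List (List String)) (j : Nat)
    (D : PySem.Dict String (List Int)) (hD : ∀ a, D.getD a [] = pvIdxList vals j a) (a : String) :
    ((vals.getD j []).foldl (fun di a' => di.insert a' (PySem.Set.add (di.getD a' []) (Int.ofNat j))) D).getD a []
      = pvIdxList vals (j+1) a := by
  rw [pv_getD_foldl_insert_add, pv_idxList_succ, hD]
  by_cases h : a ∈ vals.getD j []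
  · have hni : Int.ofNat j ∉ pvIdxList vals j a := by
      rw [pv_mem_idxList]
      rintro ⟨i, hi, -, hx⟩
      have : i = j := Int.ofNat_inj.mp hx.symm
      omega
    have h' := h
    simp only [List.getD_eq_getElem?_getD] at h'
    rw [if_pos h, if_pos (show (vals.getD j []).contains a = true by simpa using h)]
    exact PySem.Set.add_of_not_mem hni
  · rw [if_neg h, if_neg (show ¬((vals.getD j []).contains a = true) by simpa using h), List.append_nil]

lemma pv_B_loop (vals : List (List String)) :
    ∀ (rest : List (List String)) (j : Nat) (D : PySem.Dict String (List Int)) (t : Int),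
    vals.drop j = rest →
    (∀ a, D.getD a [] = pvIdxList vals j a) →
    ((PySem.List.enumerate rest (Int.ofNat j)).foldl
      (fun (st : PySem.Dict String (List Int) × Int) p =>
        (p.2.foldl (fun di a => di.insert a (PySem.Set.add (di.getD a []) p.1)) st.1,
         st.2 + ((p.2.foldl (fun nb a => PySem.Set.union nb (st.1.getD a [])) PySem.Set.empty).length : Int)))
      (D, t)).2
    = t + ((List.range rest.length).map (fun l => (pvInner vals (j+l) : Int))).sum := by
  intro rest
  induction rest with
  | nil => intro j D t _ _; simp [PySem.List.enumerate]
  | cons r rs ih =>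
    intro j D t hdrop hD
    have hlen : (vals.drop j).length = rs.length + 1 := by rw [hdrop]; simp
    have hj : j < vals.length := by
      rw [List.length_drop] at hlen; omega
    have hr : vals.getD j [] = r := by
      have h0 : (vals.drop j)[0]? = some r := by rw [hdrop]; rfl
      rw [List.getElem?_drop] at h0
      simp only [List.getD_eq_getElem?_getD]
      simp only [Nat.add_zero] at h0
      rw [h0]
      rfl
    have hdrop' : vals.drop (j+1) = rs := by
      rw [← List.drop_drop, hdrop]
      rfl
    rw [PySem.List.enumerate_cons, List.foldl_cons]
    have hcast : Int.ofNat j + 1 = Int.ofNat (j+1) := by simp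
    rw [hcast]
    rw [ih (j+1) _ _ hdrop' (by
      intro a
      have hstep := pv_inv_step vals j D hD a
      rw [hr] at hstep
      exact hstep)]
    have hnb : ((r.foldl (fun nb a => PySem.Set.union nb (D.getD a [])) PySem.Set.empty).length : Int)
        = (pvInner vals j : Int) := by
      rw [← hr, pv_neighbors_len vals j D hD]
    simp only [hnb]
    rw [List.length_cons, List.range_succ_eq_map, List.map_cons, List.sum_cons, List.map_map]
    have harg : ((fun l => (pvInner vals (j + l) : Int)) ∘ Nat.succ) = (fun l => (pvInner vals (j + 1 + l) : Int)) := by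
      funext l
      simp only [Function.comp]
      congr 2
      omega
    rw [harg]
    simp only [Nat.add_zero]
    ring



lemma pvB_eq (usage : List (String × List String)) :
    calculate_connected_pairs_py_alt usage = (pvCount (PySem.Dict.ofList usage).values : Int) := by
  simp only [calculate_connected_pairs_py_alt]
  have h0 : (0 : Int) = Int.ofNat 0 := rfl
  rw [h0, pv_B_loop (PySem.Dict.ofList usage).values (PySem.Dict.ofList usage).values 0
    PySem.Dict.empty (Int.ofNat 0) rfl (by intro a; simp [pvIdxList])]
  have hfun : (fun l => (pvInner (PySem.Dict.ofList usage).values (0 + l) : Int))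
      = (fun l : Nat => (l : Int)) ∘ (fun l => pvInner (PySem.Dict.ofList usage).values l) := by
    funext l
    simp
  rw [hfun, ← List.map_map, pvCount]
  rw [Nat.cast_list_sum]
  simp

lemma pv_inter_ne_nil (u v : List String) :
    (PySem.Set.inter (PySem.Set.ofList u) v ≠ []) ↔ pvConn u v = true := by
  rw [Ne, List.eq_nil_iff_forall_not_mem, pvConn, List.any_eq_true]
  push Not
  constructor
  · rintro ⟨x, hx⟩
    rw [PySem.Set.mem_inter, PySem.Set.mem_ofList] at hx
    exact ⟨x, hx.1, by simpa using hx.2⟩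
  · rintro ⟨x, hx1, hx2⟩
    refine ⟨x, ?_⟩
    rw [PySem.Set.mem_inter, PySem.Set.mem_ofList]
    exact ⟨hx1, by simpa using hx2⟩

lemma pv_countP_pyRange (k n : Nat) (p : Int → Bool) :
    (PySem.List.pyRange ((k : Int)+1) (n : Int) 1).countP p
      = (List.range n).countP (fun j => decide (k < j) && p ((j : Nat) : Int)) := by
  induction n with
  | zero =>
    rw [PySem.List.pyRange_one_eq_nil (by push_cast; omega)]
    simp
  | succ n ih =>
    rw [List.range_succ, List.countP_append]
    by_cases hk : k < n
    · rw [show ((n+1:Nat) : Int) = (n:Int)+1 by push_cast; ring,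
         PySem.List.pyRange_one_succ_right (by omega), List.countP_append, ih]
      simp [hk]
    · have hz : (List.range n).countP (fun j => decide (k < j) && p ((j : Nat) : Int)) = 0 := by
        rw [List.countP_eq_zero]
        intro a ha
        rw [List.mem_range] at ha
        simp [show ¬ (k < a) by omega]
      rw [hz]
      by_cases hk2 : k = n
      · subst hk2
        rw [PySem.List.pyRange_one_eq_nil (by push_cast; omega)]
        simp
      · rw [PySem.List.pyRange_one_eq_nil (by push_cast; omega)]
        simp [show ¬ (k < n) from hk]

lemma pv_sum_ite (l : List Nat) (p : Nat → Bool) :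
    (l.map (fun k => if p k then 1 else 0)).sum = l.countP p := by
  induction l with
  | nil => rfl
  | cons x xs ih =>
    rw [List.map_cons, List.sum_cons, ih, List.countP_cons]
    by_cases h : p x
    · simp [h]; omega
    · simp [h]

lemma pv_swap (n : Nat) (q : Nat → Nat → Bool) :
    ((List.range n).map (fun k => (List.range n).countP (fun j => decide (k < j) && q k j))).sum
      = ((List.range n).map (fun j => (List.range j).countP (fun i => q i j))).sum := by
  induction n with
  | zero => rfl
  | succ n ih =>
    conv_rhs => rw [List.range_succ, List.map_append, List.sum_append]
    conv_lhs => rw [List.range_succ, List.map_append, List.sum_append]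
    have hlast : (List.range n ++ [n]).countP (fun j => decide (n < j) && q n j) = 0 := by
      rw [List.countP_eq_zero]
      intro a ha
      rw [List.mem_append, List.mem_range, List.mem_singleton] at ha
      simp [show ¬ (n < a) by omega]
    have hfun : ∀ k ∈ List.range n,
        (List.range n ++ [n]).countP (fun j => decide (k < j) && q k j)
          = (List.range n).countP (fun j => decide (k < j) && q k j) + (if q k n then 1 else 0) := by
      intro k hk
      rw [List.mem_range] at hk
      rw [List.countP_append]
      congr 1
      simp [hk]
    rw [List.map_congr_left hfun, List.sum_map_add, pv_sum_ite, ih]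
    simp
    intro a h1 h2
    omega



lemma pvA_eq (usage : List (String × List String)) :
    calculate_connected_pairs_py usage = (pvCount (PySem.Dict.ofList usage).values : Int) := by
  simp only [calculate_connected_pairs_py]
  generalize hd : PySem.Dict.ofList usage = d
  have hnd : d.keys.Nodup := by rw [← hd]; exact PySem.Dict.nodup_keys_ofList usage
  have hvals : d.values = d.keys.map (fun k => d.getD k []) := PySem.Dict.values_eq_map_keys d hnd []
  have hlen : d.values.length = d.keys.length := by rw [hvals, List.length_map]
  have hkv : ∀ j : Nat, j < d.keys.length → d.getD (d.keys.getD j "") [] = d.values.getD j [] := by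
    intro j hj
    rw [List.getD_eq_getElem _ _ hj, hvals,
      List.getD_eq_getElem _ _ (by rw [List.length_map]; exact hj), List.getElem_map]
  -- inner loop is a count
  have hbody : (fun (acc : Int) (i : Int) =>
      (PySem.List.pyRange (i + 1) (d.keys.length : Int) 1).foldl
        (fun acc j =>
          if PySem.Set.inter (PySem.Set.ofList (d.getD (PySem.List.pyGetD d.keys i "") []))
              (d.getD (PySem.List.pyGetD d.keys j "") []) ≠ [] then acc + 1
          else acc)
        acc)
      = (fun (acc : Int) (i : Int) => acc +
          ((PySem.List.pyRange (i + 1) (d.keys.length : Int) 1).countP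
            (fun j => decide (PySem.Set.inter (PySem.Set.ofList (d.getD (PySem.List.pyGetD d.keys i "") []))
              (d.getD (PySem.List.pyGetD d.keys j "") []) ≠ [])) : Int)) := by
    funext acc i
    rw [PySem.List.foldl_ite_add_one]
  rw [hbody, PySem.List.foldl_add, PySem.List.pyRange_zero_natCast, List.map_map]
  have hmap : ∀ k ∈ List.range d.keys.length,
      ((fun i : Int =>
          ((PySem.List.pyRange (i + 1) (d.keys.length : Int) 1).countP
            (fun j => decide (PySem.Set.inter (PySem.Set.ofList (d.getD (PySem.List.pyGetD d.keys i "") []))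
              (d.getD (PySem.List.pyGetD d.keys j "") []) ≠ [])) : Int)) ∘ (fun k : Nat => (k : Int))) k
        = ((List.range d.keys.length).countP
            (fun j => decide (k < j) && pvConn (d.values.getD k []) (d.values.getD j [])) : Int) := by
    intro k hk
    rw [List.mem_range] at hk
    simp only [Function.comp]
    rw [pv_countP_pyRange k d.keys.length]
    congr 1
    apply List.countP_congr
    intro j hj
    rw [List.mem_range] at hj
    simp only [PySem.List.pyGetD_natCast, Bool.and_eq_true, decide_eq_true_eq]
    constructor
    · rintro ⟨h1, h2⟩
      rw [hkv k hk, hkv j hj] at h2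
      exact ⟨h1, (pv_inter_ne_nil _ _).mp h2⟩
    · rintro ⟨h1, h2⟩
      refine ⟨h1, ?_⟩
      rw [hkv k hk, hkv j hj]
      exact (pv_inter_ne_nil _ _).mpr h2
  rw [List.map_congr_left hmap]
  have hfun2 : (fun k => ((List.range d.keys.length).countP
            (fun j => decide (k < j) && pvConn (d.values.getD k []) (d.values.getD j [])) : Int))
      = (fun n : Nat => (n : Int)) ∘ (fun k => (List.range d.keys.length).countP
            (fun j => decide (k < j) && pvConn (d.values.getD k []) (d.values.getD j []))) := by
    funext k
    rfl
  rw [hfun2, ← List.map_map, ← Nat.cast_list_sum, pv_swap d.keys.length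
    (fun i j => pvConn (d.values.getD i []) (d.values.getD j []))]
  rw [pvCount, hlen, zero_add]
  congr 1
  exact congrArg List.sum (List.map_congr_left (fun j _ => by
    rw [pvInner, List.countP_eq_length_filter]))

-- ===== VERDICT (by name: the statement is the Claim_ definition above) =====
theorem calculate_connected_pairs_py_spec : Claim_equal_calculate_connected_pairs_py := by
  intro usage _
  unfold Spec_calculate_connected_pairs_py
  rw [pvA_eq, pvB_eq]
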